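-- pv_equiv track=rewrite | github.com/BitSwt/Cluade_Academic_Assistant | shared/compliance_check.py | check_needspace
-- ===== SOURCE A (Python) =====
-- def check_needspace(tex, name):
--     """longtable/tabulary 앞 needspace 누락"""
--     issues = []
--     lines = tex.split('\n')
--     for i, line in enumerate(lines):
--         if r'\begin{longtable}' in line or r'\begin{concepttable}' in line:
--             # 앞 10줄 내에 \needspace가 있는지
--             context = '\n'.join(lines[max(0, i-10):i])
--             if r'\needspace' not in context:
--                 # weeksection 직후이거나 subsection 직후인 경우도 허용
--                 if r'\weeksection' not in context and r'\subsection' not in context: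
--                     issues.append(f"  needspace 누락: {name} L{i+1} — 표 앞에 \\needspace 없음")
--     return issues
-- ===== SOURCE B (Python) =====
-- def check_needspace(tex, name):
--     """longtable/tabulary 앞 needspace 누락 — single pass with last-seen line indices instead of re-joining a 10-line window per table."""
--     issues = []
--     last_need = -100
--     last_sec = -100
--     for i, line in enumerate(tex.split('\n')):
--         if r'\begin{longtable}' in line or r'\begin{concepttable}' in line:
--             if last_need < i - 10 and last_sec < i - 10:
--                 issues.append(f"  needspace 누락: {name} L{i+1} — 표 앞에 \\needspace 없음")
--         if r'\needspace' in line: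
--             last_need = i
--         if r'\weeksection' in line or r'\subsection' in line:
--             last_sec = i
--     return issues
-- ===== Notes on version B (the rewrite author's own statement) =====
-- stated objective: faster
-- what changed: Instead of re-building and re-scanning a joined 10-line context string for every table line, B makes a single pass that tracks the last line index containing \needspace and the last containing \weeksection/\subsection, and flags a table line iff both last-seen indices are below i-10.
import Mathlib
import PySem

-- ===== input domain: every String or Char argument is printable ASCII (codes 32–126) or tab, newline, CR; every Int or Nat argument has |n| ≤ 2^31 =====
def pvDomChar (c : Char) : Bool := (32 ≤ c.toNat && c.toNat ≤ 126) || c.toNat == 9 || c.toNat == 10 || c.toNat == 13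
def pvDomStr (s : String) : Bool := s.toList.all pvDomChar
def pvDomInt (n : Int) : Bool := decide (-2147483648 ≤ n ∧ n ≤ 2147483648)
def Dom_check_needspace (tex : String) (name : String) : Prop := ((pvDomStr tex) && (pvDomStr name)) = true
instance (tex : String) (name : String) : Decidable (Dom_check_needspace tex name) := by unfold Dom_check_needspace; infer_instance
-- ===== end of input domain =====

-- B replaces A's per-table re-join of the previous 10-line window by a single pass that tracks the
-- last line index containing \needspace and the last containing \weeksection/\subsection (objective: faster).

-- helpers shared by both ports: the raw-string literals and the f-string message of the Python sources
def ltPat : List Char := "\\begin{longtable}".toList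
def ctPat : List Char := "\\begin{concepttable}".toList
def nsPat : List Char := "\\needspace".toList
def wkPat : List Char := "\\weeksection".toList
def sbPat : List Char := "\\subsection".toList
def nsMsg (name : String) (i : Int) : String :=
  "  needspace 누락: " ++ name ++ " L" ++ PySem.Int.toStr (i + 1) ++ " — 표 앞에 \\needspace 없음"

-- ===== PORT A =====
-- loop body of A: on a table line, join the previous ≤10 lines and substring-test the joined context
def stepA (name : String) (lines : List (List Char)) (issues : List String) (p : Int × List Char) : List String :=
  if PySem.Chars.isIn ltPat p.2 || PySem.Chars.isIn ctPat p.2 then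
    let context := PySem.Chars.join ['\n'] (PySem.List.slice lines (some (max 0 (p.1 - 10))) (some p.1))
    if PySem.Chars.isIn nsPat context then issues
    else if PySem.Chars.isIn wkPat context || PySem.Chars.isIn sbPat context then issues
    else issues ++ [nsMsg name p.1]
  else issues

def check_needspace (tex : String) (name : String) : List String :=
  let lines := PySem.Chars.splitOn tex.toList ['\n']
  (PySem.List.enumerate lines).foldl (stepA name lines) []

-- ===== PORT B =====
-- loop body of B: state = (issues, last line index with \needspace, last index with \weeksection/\subsection)
def stepB (name : String) (st : List String × Int × Int) (p : Int × List Char) : List String × Int × Int :=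
  let issues :=
    if (PySem.Chars.isIn ltPat p.2 || PySem.Chars.isIn ctPat p.2)
        && decide (st.2.1 < p.1 - 10) && decide (st.2.2 < p.1 - 10)
    then st.1 ++ [nsMsg name p.1] else st.1
  let lastNeed := if PySem.Chars.isIn nsPat p.2 then p.1 else st.2.1
  let lastSec := if PySem.Chars.isIn wkPat p.2 || PySem.Chars.isIn sbPat p.2 then p.1 else st.2.2
  (issues, lastNeed, lastSec)

def check_needspace_alt (tex : String) (name : String) : List String :=
  ((PySem.List.enumerate (PySem.Chars.splitOn tex.toList ['\n'])).foldl (stepB name) ([], -100, -100)).1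

-- ===== PRECONDITION & SPEC =====
def Spec_check_needspace (tex : String) (name : String) (out : List String) : Prop := out = check_needspace_alt tex name
instance (tex : String) (name : String) (out : List String) : Decidable (Spec_check_needspace tex name out) := by unfold Spec_check_needspace; infer_instance

-- ===== CLAIM (what is proved, stated in full; the proofs are below) =====
def Claim_equal_check_needspace : Prop := ∀ (tex : String) (name : String), Dom_check_needspace tex name → Spec_check_needspace tex name (check_needspace tex name)

-- ===== LEMMAS AND PROOFS =====

-- per-line predicates (proof abbreviations)
def needP (l : List Char) : Bool := PySem.Chars.isIn nsPat l
def secP (l : List Char) : Bool := PySem.Chars.isIn wkPat l || PySem.Chars.isIn sbPat l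

-- last index in `l` whose line satisfies p, or the sentinel -100 (B's second/third state component)
def lastIdx (p : List Char → Bool) (l : List (List Char)) : Int :=
  (PySem.List.enumerate l).foldl (fun a q => if p q.2 then q.1 else a) (-100)

lemma mem_enumerate_bounds {α : Type} (l : List α) (s : Int) (p : Int × α) (h : p ∈ PySem.List.enumerate l s) :
    s ≤ p.1 ∧ p.1 < s + l.length := by
  induction l generalizing s with
  | nil => simp [PySem.List.enumerate] at h
  | cons a t ih =>
    rw [show PySem.List.enumerate (a::t) s = (s,a) :: PySem.List.enumerate t (s+1) by simp [PySem.List.enumerate]] at h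
    rcases List.mem_cons.mp h with h | h
    · subst h; constructor <;> simp
    · have := ih (s+1) h; simp at this ⊢; omega

lemma enumerate_snoc {α : Type} (l : List α) (x : α) :
    PySem.List.enumerate (l ++ [x]) = PySem.List.enumerate l ++ [((l.length : Int), x)] := by
  rw [PySem.List.enumerate_append]
  simp [PySem.List.enumerate]

lemma lastIdx_append (p : List Char → Bool) (l : List (List Char)) (x : List Char) :
    lastIdx p (l ++ [x]) = if p x then (l.length : Int) else lastIdx p l := by
  unfold lastIdx
  rw [enumerate_snoc, List.foldl_append]
  simp

lemma lastIdx_spec (p : List Char → Bool) (l : List (List Char)) :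
    (lastIdx p l = -100 ∧ ∀ w ∈ l, p w = false) ∨
    (∃ j : Nat, ∃ hj : j < l.length, lastIdx p l = (j : Int) ∧ p l[j] = true ∧
      ∀ k, j < k → ∀ hk : k < l.length, p l[k] = false) := by
  induction l using List.reverseRecOn with
  | nil => left; constructor <;> simp [lastIdx, PySem.List.enumerate]
  | append_singleton init x ih =>
    rw [lastIdx_append]
    by_cases hx : p x = true
    · right
      refine ⟨init.length, by simp, by simp [hx], ?_, ?_⟩
      · simp [hx]
      · intro k hk hk2; simp at hk2; omega
    · simp only [hx, if_neg, Bool.false_eq_true, not_false_iff]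
      rcases ih with ⟨h1, h2⟩ | ⟨j, hj, h1, h2, h3⟩
      · left
        refine ⟨by simp [h1], ?_⟩
        intro w hw
        rcases List.mem_append.mp hw with h | h
        · exact h2 w h
        · simp at h; subst h; simpa using hx
      · right
        refine ⟨j, by simp; omega, by simp [h1], ?_, ?_⟩
        · rw [List.getElem_append_left hj]; exact h2
        · intro k hk hk2
          simp at hk2
          by_cases hkl : k < init.length
          · rw [List.getElem_append_left hkl]; exact h3 k hk hkl
          · have : k = init.length := by omega
            subst this
            rw [List.getElem_append_right (le_refl _)]
            simpa using hx

-- A's window test over the last ≤10 lines ↔ B's last-seen-index test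
lemma window_iff (p : List Char → Bool) (l : List (List Char)) :
    (∀ w ∈ l.drop (l.length - 10), p w = false) ↔ lastIdx p l < (l.length : Int) - 10 := by
  constructor
  · intro h
    rcases lastIdx_spec p l with ⟨h1, _⟩ | ⟨j, hj, h1, h2, _⟩
    · rw [h1]; omega
    · rw [h1]
      by_contra hc
      have hjge : l.length - 10 ≤ j := by omega
      have hmem : l[j] ∈ l.drop (l.length - 10) := by
        rw [List.mem_drop_iff_getElem]
        exact ⟨j - (l.length - 10), by omega, by congr 1; omega⟩
      have := h _ hmem
      rw [h2] at this; exact absurd this (by simp)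
  · intro h w hw
    rcases lastIdx_spec p l with ⟨_, h2⟩ | ⟨j, hj, h1, h2, h3⟩
    · exact h2 w (List.mem_of_mem_drop hw)
    · rw [List.mem_drop_iff_getElem] at hw
      rcases hw with ⟨i, hi, hw⟩
      rw [← hw]
      have : j < l.length - 10 + i := by omega
      exact h3 _ this _

lemma prefix_append_cons {sub d e : List Char} {c : Char} (h : c ∉ sub) :
    sub <+: d ++ c :: e ↔ sub <+: d := by
  constructor
  · intro hp
    induction d generalizing sub with
    | nil =>
      match sub, hp with
      | [], _ => exact List.nil_prefix
      | s :: sub', hp =>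
        have : s = c := (List.cons_prefix_cons.mp hp).1
        exact absurd (this ▸ List.mem_cons_self) h
    | cons y d' ih =>
      match sub, hp with
      | [], _ => exact List.nil_prefix
      | s :: sub', hp =>
        rcases List.cons_prefix_cons.mp hp with ⟨rfl, hp'⟩
        exact List.cons_prefix_cons.mpr ⟨rfl, ih (fun hm => h (List.mem_cons_of_mem _ hm)) hp'⟩
  · intro hp
    exact hp.trans (List.prefix_append _ _)

lemma infix_append_cons {sub a b : List Char} {c : Char} (hne : sub ≠ []) (h : c ∉ sub) :
    (sub <:+: a ++ c :: b) ↔ (sub <:+: a ∨ sub <:+: b) := by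
  induction a with
  | nil =>
    simp only [List.nil_append]
    rw [List.infix_cons_iff]
    constructor
    · rintro (hp | hi)
      · match sub, hp with
        | [], _ => exact absurd rfl hne
        | s :: sub', hp =>
          have : s = c := (List.cons_prefix_cons.mp hp).1
          exact absurd (this ▸ List.mem_cons_self) h
      · exact Or.inr hi
    · rintro (hi | hi)
      · rw [List.infix_nil] at hi; exact absurd hi hne
      · exact Or.inr hi
  | cons y a' ih =>
    rw [List.cons_append, List.infix_cons_iff, List.infix_cons_iff, ih]
    constructor
    · rintro (hp | hi | hi)
      · exact Or.inl (Or.inl ((prefix_append_cons (d := y :: a') h).mp hp))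
      · exact Or.inl (Or.inr hi)
      · exact Or.inr hi
    · rintro ((hp | hi) | hi)
      · exact Or.inl ((prefix_append_cons (d := y :: a') h).mpr hp)
      · exact Or.inr (Or.inl hi)
      · exact Or.inr (Or.inr hi)

-- a newline-free pattern occurs in '\n'.join(ws) iff it occurs in one of the lines
lemma infix_join {sub : List Char} {c : Char} (hne : sub ≠ []) (h : c ∉ sub) (ws : List (List Char)) :
    (sub <:+: PySem.Chars.join [c] ws) ↔ ∃ w ∈ ws, sub <:+: w := by
  induction ws with
  | nil =>
    rw [PySem.Chars.join_nil, List.infix_nil]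
    simp [hne]
  | cons w ws' ih =>
    match ws' with
    | [] => rw [PySem.Chars.join_singleton]; simp
    | w' :: rest =>
      rw [PySem.Chars.join_cons_cons]
      rw [show w ++ [c] ++ PySem.Chars.join [c] (w' :: rest) = w ++ c :: PySem.Chars.join [c] (w' :: rest) by simp]
      rw [infix_append_cons hne h, ih]
      simp

lemma isIn_join_false {sub : List Char} {c : Char} (hne : sub ≠ []) (h : c ∉ sub) (ws : List (List Char)) :
    (PySem.Chars.isIn sub (PySem.Chars.join [c] ws) = false) ↔ ∀ w ∈ ws, PySem.Chars.isIn sub w = false := by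
  rw [PySem.Chars.isIn_eq_false_iff, infix_join hne h]
  simp only [not_exists, not_and]
  constructor
  · intro hx w hw
    rw [PySem.Chars.isIn_eq_false_iff]; exact hx w hw
  · intro hx w hw
    rw [← PySem.Chars.isIn_eq_false_iff]; exact hx w hw

lemma slice_prefix (init : List (List Char)) (x : List Char) (i : Int) (hi0 : 0 ≤ i) (hi : i ≤ (init.length : Int)) :
    PySem.List.slice (init ++ [x]) (some (max 0 (i - 10))) (some i)
      = PySem.List.slice init (some (max 0 (i - 10))) (some i) := by
  obtain ⟨n, rfl⟩ : ∃ n : Nat, i = (n : Int) := ⟨i.toNat, by omega⟩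
  have hm : max 0 ((n : Int) - 10) = ((n - 10 : Nat) : Int) := by omega
  rw [hm, PySem.List.slice_natCast, PySem.List.slice_natCast]
  have hle : n ≤ init.length := by exact_mod_cast hi
  rw [List.drop_append_of_le_length (by omega)]
  rw [List.take_append_of_le_length (by simp; omega)]

-- the slice A takes at the final line of `init ++ [x]` is the last ≤10 lines of `init`
lemma slice_window (init : List (List Char)) (x : List Char) :
    PySem.List.slice (init ++ [x]) (some (max 0 ((init.length : Int) - 10))) (some (init.length : Int))
      = init.drop (init.length - 10) := by
  rw [slice_prefix init x _ (by positivity) le_rfl]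
  have hm : max 0 (((init.length : Nat) : Int) - 10) = ((init.length - 10 : Nat) : Int) := by omega
  rw [hm, PySem.List.slice_natCast]
  apply List.take_of_length_le
  simp

-- stepA only looks at the first p.1 lines, so a line appended behind p.1 does not change it
lemma stepA_congr (name : String) (init : List (List Char)) (x : List Char)
    (acc : List String) (p : Int × List Char) (hp : p ∈ PySem.List.enumerate init) :
    stepA name (init ++ [x]) acc p = stepA name init acc p := by
  have hb := mem_enumerate_bounds init 0 p hp
  unfold stepA
  rw [slice_prefix init x p.1 (by omega) (by omega)]

lemma stepA_last (name : String) (init : List (List Char)) (x : List Char) (acc : List String) :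
    stepA name (init ++ [x]) acc ((init.length : Int), x)
      = if (PySem.Chars.isIn ltPat x || PySem.Chars.isIn ctPat x)
            && decide (lastIdx needP init < (init.length : Int) - 10)
            && decide (lastIdx secP init < (init.length : Int) - 10)
        then acc ++ [nsMsg name (init.length : Int)] else acc := by
  unfold stepA
  simp only [slice_window]
  have hneed : (PySem.Chars.isIn nsPat
      (PySem.Chars.join ['\n'] (init.drop (init.length - 10))) = false)
      ↔ lastIdx needP init < (init.length : Int) - 10 := by
    rw [isIn_join_false (by decide) (by decide)]
    exact window_iff needP init
  have hsec : ((PySem.Chars.isIn wkPat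
      (PySem.Chars.join ['\n'] (init.drop (init.length - 10))) ||
      PySem.Chars.isIn sbPat
      (PySem.Chars.join ['\n'] (init.drop (init.length - 10)))) = false)
      ↔ lastIdx secP init < (init.length : Int) - 10 := by
    rw [Bool.or_eq_false_iff]
    rw [isIn_join_false (by decide) (by decide), isIn_join_false (by decide) (by decide)]
    rw [← window_iff secP init]
    unfold secP
    constructor
    · intro ⟨h1, h2⟩ w hw; rw [Bool.or_eq_false_iff]; exact ⟨h1 w hw, h2 w hw⟩
    · intro h1
      exact ⟨fun w hw => (Bool.or_eq_false_iff.mp (h1 w hw)).1,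
             fun w hw => (Bool.or_eq_false_iff.mp (h1 w hw)).2⟩
  by_cases ht : (PySem.Chars.isIn ltPat x || PySem.Chars.isIn ctPat x) = true
  · simp only [ht, if_true, Bool.true_and]
    by_cases hn : lastIdx needP init < (init.length : Int) - 10
    · rw [hneed.mpr hn]
      simp only [Bool.false_eq_true, if_false]
      by_cases hs : lastIdx secP init < (init.length : Int) - 10
      · rw [hsec.mpr hs]; simp [hs, hn]
      · have h2 : (PySem.Chars.isIn wkPat
            (PySem.Chars.join ['\n'] (init.drop (init.length - 10))) ||
            PySem.Chars.isIn sbPat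
            (PySem.Chars.join ['\n'] (init.drop (init.length - 10)))) = true := by
          rcases Bool.eq_false_or_eq_true (PySem.Chars.isIn wkPat
            (PySem.Chars.join ['\n'] (init.drop (init.length - 10))) ||
            PySem.Chars.isIn sbPat
            (PySem.Chars.join ['\n'] (init.drop (init.length - 10)))) with h | h
          · exact h
          · exact absurd (hsec.mp h) hs
        rw [h2]; simp [hs]
    · have h2 : PySem.Chars.isIn nsPat
          (PySem.Chars.join ['\n'] (init.drop (init.length - 10))) = true := by
        rcases Bool.eq_false_or_eq_true (PySem.Chars.isIn nsPat
          (PySem.Chars.join ['\n'] (init.drop (init.length - 10)))) with h | h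
        · exact h
        · exact absurd (hneed.mp h) hn
      rw [h2]; simp [hn]
  · simp only [Bool.not_eq_true] at ht
    simp [ht]

lemma main_inv (name : String) (lines : List (List Char)) :
    (PySem.List.enumerate lines).foldl (stepB name) ([], -100, -100)
      = ((PySem.List.enumerate lines).foldl (stepA name lines) [], lastIdx needP lines, lastIdx secP lines) := by
  induction lines using List.reverseRecOn with
  | nil => simp [lastIdx, PySem.List.enumerate]
  | append_singleton init x ih =>
    rw [enumerate_snoc, List.foldl_append, List.foldl_append, ih]
    rw [PySem.List.foldl_congr_mem _ _ (stepA name init) _ (fun acc p hp => stepA_congr name init x acc p hp)]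
    rw [lastIdx_append, lastIdx_append]
    simp only [List.foldl_cons, List.foldl_nil]
    rw [show stepB name ((PySem.List.enumerate init).foldl (stepA name init) [], lastIdx needP init, lastIdx secP init) ((init.length : Int), x)
        = ((if (PySem.Chars.isIn ltPat x || PySem.Chars.isIn ctPat x)
              && decide (lastIdx needP init < (init.length : Int) - 10)
              && decide (lastIdx secP init < (init.length : Int) - 10)
            then (PySem.List.enumerate init).foldl (stepA name init) [] ++ [nsMsg name (init.length : Int)]
            else (PySem.List.enumerate init).foldl (stepA name init) []),
           (if PySem.Chars.isIn nsPat x then (init.length : Int) else lastIdx needP init),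
           (if PySem.Chars.isIn wkPat x || PySem.Chars.isIn sbPat x then (init.length : Int) else lastIdx secP init)) from rfl]
    rw [stepA_last]
    rfl

-- ===== VERDICT (by name: the statement is the Claim_ definition above) =====
theorem check_needspace_spec : Claim_equal_check_needspace := by
  intro tex name _
  unfold Spec_check_needspace check_needspace check_needspace_alt
  rw [main_inv]
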